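-- pv_equiv track=rewrite | github.com/MaiKuraki/Blender-For-UnrealEngine-Addons | blender-for-unrealengine/bfu_import_module/import_module_unreal_utils.py | clean_filename_for_unreal
-- ===== SOURCE A (Python) =====
-- import string
--
-- def clean_filename_for_unreal(filename):
--     """
--     Returns a valid Unreal asset name by replacing invalid characters.
--     Normalizes string, removes non-alpha characters
--     """
--
--     filename = filename.replace('.', '_')
--     filename = filename.replace('(', '_')
--     filename = filename.replace(')', '_')
--     filename = filename.replace(' ', '_')
--     valid_chars = "-_%s%s" % (string.ascii_letters, string.digits)
--     filename = ''.join(c for c in filename if c in valid_chars)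
--     return filename
-- ===== SOURCE B (Python) =====
-- import string
--
-- _SPECIALS = {'.', '(', ')', ' '}
-- _VALID = set("-_" + string.ascii_letters + string.digits)
--
-- def clean_filename_for_unreal(filename):
--     # Single pass: map the four special characters to '_', keep valid
--     # characters, drop everything else.
--     out = []
--     for c in filename:
--         if c in _SPECIALS:
--             out.append('_')
--         elif c in _VALID:
--             out.append(c)
--     return ''.join(out)
-- ===== Notes on version B (the rewrite author's own statement) =====
-- stated objective: alternative
-- what changed: Replaces A's four sequential str.replace passes plus a final filtering join with one single pass that classifies each character against two precomputed sets; same output, same asymptotic cost.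
import Mathlib
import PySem

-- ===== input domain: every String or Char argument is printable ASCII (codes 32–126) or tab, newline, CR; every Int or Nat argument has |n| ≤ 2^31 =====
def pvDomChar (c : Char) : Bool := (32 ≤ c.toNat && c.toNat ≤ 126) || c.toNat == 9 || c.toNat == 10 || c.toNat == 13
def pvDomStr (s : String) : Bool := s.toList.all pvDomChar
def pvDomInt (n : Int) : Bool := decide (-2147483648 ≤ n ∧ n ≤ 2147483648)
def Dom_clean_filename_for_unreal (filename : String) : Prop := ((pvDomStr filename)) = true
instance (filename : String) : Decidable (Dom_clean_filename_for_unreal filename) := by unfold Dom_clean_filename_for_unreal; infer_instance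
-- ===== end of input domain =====

-- B replaces A's four sequential replace passes plus a filtering join with one
-- single classification pass over the string (alternative decomposition, same output).


-- ===== PORT A =====
-- valid_chars = "-_%s%s" % (string.ascii_letters, string.digits)
def pvValidCharsA : List Char :=
  "-_abcdefghijklmnopqrstuvwxyzABCDEFGHIJKLMNOPQRSTUVWXYZ0123456789".toList

def clean_filename_for_unreal (filename : String) : String :=
  let f1 := PySem.Str.replace filename "." "_"
  let f2 := PySem.Str.replace f1 "(" "_"
  let f3 := PySem.Str.replace f2 ")" "_"
  let f4 := PySem.Str.replace f3 " " "_"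
  -- `c in valid_chars` for a single character c is membership in the char list
  String.mk (f4.toList.filter (fun c => pvValidCharsA.contains c))

-- ===== PORT B =====
def pvSpecials : List Char := ['.', '(', ')', ' ']
def pvValidCharsB : List Char :=
  "-_abcdefghijklmnopqrstuvwxyzABCDEFGHIJKLMNOPQRSTUVWXYZ0123456789".toList

def pvCleanChar (c : Char) : Option Char :=
  if pvSpecials.contains c then some '_'
  else if pvValidCharsB.contains c then some c
  else none

def clean_filename_for_unreal_alt (filename : String) : String :=
  String.mk (filename.toList.filterMap pvCleanChar)

-- ===== PRECONDITION & SPEC =====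
def Spec_clean_filename_for_unreal (filename : String) (out : String) : Prop := out = clean_filename_for_unreal_alt filename
instance (filename : String) (out : String) : Decidable (Spec_clean_filename_for_unreal filename out) := by unfold Spec_clean_filename_for_unreal; infer_instance

-- ===== CLAIM (what is proved, stated in full; the proofs are below) =====
def Claim_equal_clean_filename_for_unreal : Prop := ∀ (filename : String), Dom_clean_filename_for_unreal filename → Spec_clean_filename_for_unreal filename (clean_filename_for_unreal filename)

-- ===== LEMMAS AND PROOFS =====

-- replace with a one-character pattern is a pointwise map
theorem replace_go_single (a b : Char) :
    ∀ (l acc : List Char) (fuel : Nat), l.length ≤ fuel →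
      PySem.Chars.replace.go [a] [b] fuel l acc
        = acc.reverse ++ l.map (fun c => if a = c then b else c) := by
  intro l
  induction l with
  | nil =>
      intro acc fuel _
      cases fuel <;> simp [PySem.Chars.replace.go]
  | cons c t ih =>
      intro acc fuel hf
      cases fuel with
      | zero => simp at hf
      | succ fuel =>
        have ht : t.length ≤ fuel := by simpa using hf
        by_cases h : a = c
        · subst h
          simp [PySem.Chars.replace.go, List.isPrefixOf, ih _ _ ht]
        · have hp : ([a].isPrefixOf (c :: t)) = false := by
            simp [List.isPrefixOf]; exact h
          simp [PySem.Chars.replace.go, hp, ih _ _ ht, h]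

theorem replace_single (a b : Char) (s : List Char) :
    PySem.Chars.replace s [a] [b] = s.map (fun c => if a = c then b else c) := by
  rw [PySem.Chars.replace]
  simp [replace_go_single a b s [] s.length le_rfl]

-- per-character agreement of A's mapped-then-filtered step with B's classifier
theorem char_step (c : Char) :
    (if pvValidCharsA.contains
        (if ' ' = (if ')' = (if '(' = (if '.' = c then '_' else c) then '_'
            else (if '.' = c then '_' else c)) then '_'
            else (if '(' = (if '.' = c then '_' else c) then '_'
            else (if '.' = c then '_' else c))) then '_'
        else (if ')' = (if '(' = (if '.' = c then '_' else c) then '_'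
            else (if '.' = c then '_' else c)) then '_'
            else (if '(' = (if '.' = c then '_' else c) then '_'
            else (if '.' = c then '_' else c)))) = true
      then [(if ' ' = (if ')' = (if '(' = (if '.' = c then '_' else c) then '_'
            else (if '.' = c then '_' else c)) then '_'
            else (if '(' = (if '.' = c then '_' else c) then '_'
            else (if '.' = c then '_' else c))) then '_'
        else (if ')' = (if '(' = (if '.' = c then '_' else c) then '_'
            else (if '.' = c then '_' else c)) then '_'
            else (if '(' = (if '.' = c then '_' else c) then '_'
            else (if '.' = c then '_' else c))))]
      else []) = (pvCleanChar c).toList := by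
  by_cases h1 : '.' = c
  · subst h1; decide
  by_cases h2 : '(' = c
  · subst h2; decide
  by_cases h3 : ')' = c
  · subst h3; decide
  by_cases h4 : ' ' = c
  · subst h4; decide
  · have hs : pvSpecials.contains c = false := by
      simp [pvSpecials]
      exact ⟨fun h => h1 h.symm, fun h => h2 h.symm, fun h => h3 h.symm, fun h => h4 h.symm⟩
    simp only [if_neg h1, if_neg h2, if_neg h3, if_neg h4, pvCleanChar, hs,
      Bool.false_eq_true, if_false]
    have hAB : pvValidCharsA = pvValidCharsB := rfl
    rw [hAB]
    by_cases hv : c ∈ pvValidCharsB <;> simp [hv]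

-- generic head step for the filter/filterMap alignment
theorem cons_combine (p : Char → Bool) (x : Char) (o : Option Char) (l : List Char)
    (hx : (if p x = true then [x] else []) = o.toList) :
    (x :: l).filter p = o.toList ++ l.filter p := by
  rw [List.filter_cons, ← hx]
  cases hpx : p x <;> simp

-- the four maps followed by the filter collapse to B's single filterMap
theorem pipeline_eq (l : List Char) :
    ((((l.map (fun c => if '.' = c then '_' else c)).map
        (fun c => if '(' = c then '_' else c)).map
        (fun c => if ')' = c then '_' else c)).map
        (fun c => if ' ' = c then '_' else c)).filter
        (fun c => pvValidCharsA.contains c)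
      = l.filterMap pvCleanChar := by
  induction l with
  | nil => rfl
  | cons c t ih =>
      simp only [List.map_cons]
      refine (cons_combine _ _ (pvCleanChar c) _ (char_step c)).trans ?_
      rw [ih]
      cases hpc : pvCleanChar c <;> simp [hpc]

-- ===== VERDICT (by name: the statement is the Claim_ definition above) =====
theorem clean_filename_for_unreal_spec : Claim_equal_clean_filename_for_unreal := by
  intro filename _
  unfold Spec_clean_filename_for_unreal clean_filename_for_unreal clean_filename_for_unreal_alt
  refine congrArg String.mk ?_
  have e1 : (PySem.Str.replace filename "." "_").toList
      = filename.toList.map (fun c => if '.' = c then '_' else c) := by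
    rw [PySem.Str.toList_replace]
    exact replace_single '.' '_' _
  have e2 : (PySem.Str.replace (PySem.Str.replace filename "." "_") "(" "_").toList
      = (PySem.Str.replace filename "." "_").toList.map (fun c => if '(' = c then '_' else c) := by
    rw [PySem.Str.toList_replace]
    exact replace_single '(' '_' _
  have e3 : (PySem.Str.replace (PySem.Str.replace (PySem.Str.replace filename "." "_") "(" "_") ")" "_").toList
      = (PySem.Str.replace (PySem.Str.replace filename "." "_") "(" "_").toList.map
          (fun c => if ')' = c then '_' else c) := by
    rw [PySem.Str.toList_replace]
    exact replace_single ')' '_' _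
  have e4 : (PySem.Str.replace (PySem.Str.replace (PySem.Str.replace (PySem.Str.replace filename "." "_") "(" "_") ")" "_") " " "_").toList
      = (PySem.Str.replace (PySem.Str.replace (PySem.Str.replace filename "." "_") "(" "_") ")" "_").toList.map
          (fun c => if ' ' = c then '_' else c) := by
    rw [PySem.Str.toList_replace]
    exact replace_single ' ' '_' _
  rw [e4, e3, e2, e1, pipeline_eq]
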